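-- pv_equiv track=rewrite | github.com/devYuMinKim/Coding_Test_with_JavaScript | 20220727/모범답안/20220727_10.js/CombineTwoDigitOddNumber.py | solution
-- ===== SOURCE A (Python) =====
-- def solution(array):
--     """
--     :param array: int[]
--     :return: int
--     """
--
--     mySet = set()
--
--     for i in range(len(array)):
--         for j in range(len(array)):
--             if i == j:
--                 continue
--
--             num = createNumber(array[i], array[j])
--             isEven = num % 2 == 1
--             if isEven:
--                 mySet.add(num)
--
--     return len(mySet)
--
-- def createNumber(tenDigits, oneDigit):
--     return tenDigits * 10 + oneDigit
-- ===== SOURCE B (Python) =====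
-- def solution(array):
--     counts = {}
--     for x in array:
--         counts[x] = counts.get(x, 0) + 1
--     keys = list(counts)
--     result = set()
--     for a in keys:
--         for b in keys:
--             if a != b or counts[a] >= 2:
--                 num = a * 10 + b
--                 if num % 2 == 1:
--                     result.add(num)
--     return len(result)
-- ===== Notes on version B (the rewrite author's own statement) =====
-- stated objective: faster
-- what changed: B counts occurrences once and iterates over ordered pairs of DISTINCT values (using count>=2 for equal pairs) instead of A's quadratic scan over all index pairs, so cost drops from O(n^2) to O(n + d^2) for d distinct values.
import Mathlib
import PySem

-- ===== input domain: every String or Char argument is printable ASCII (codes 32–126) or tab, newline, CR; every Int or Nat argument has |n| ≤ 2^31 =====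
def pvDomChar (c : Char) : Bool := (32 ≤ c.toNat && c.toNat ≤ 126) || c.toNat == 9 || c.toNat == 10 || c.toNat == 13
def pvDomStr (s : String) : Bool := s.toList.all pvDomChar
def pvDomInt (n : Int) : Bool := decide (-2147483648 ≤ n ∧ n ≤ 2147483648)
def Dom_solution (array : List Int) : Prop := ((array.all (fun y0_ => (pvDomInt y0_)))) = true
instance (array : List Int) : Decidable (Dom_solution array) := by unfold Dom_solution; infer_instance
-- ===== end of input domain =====

-- B replaces A's O(n^2) scan over all index pairs by counting occurrences once and
-- iterating over ordered pairs of distinct values (count >= 2 for equal pairs): O(n + d^2).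


-- ===== PORT A =====
def createNumber (tenDigits : Int) (oneDigit : Int) : Int :=
  tenDigits * 10 + oneDigit

def solution (array : List Int) : Int :=
  let mySet : PySem.Set Int :=
    (PySem.List.pyRange 0 (PySem.List.len array) 1).foldl (fun s i =>
      (PySem.List.pyRange 0 (PySem.List.len array) 1).foldl (fun s j =>
        if i == j then s
        else
          let num := createNumber (PySem.List.pyGetD array i 0) (PySem.List.pyGetD array j 0)
          let isEven := PySem.Int.mod num 2 == 1
          if isEven then PySem.Set.add s num else s) s) PySem.Set.empty
  PySem.Set.len mySet

-- ===== PORT B =====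
def solution_alt (array : List Int) : Int :=
  let counts : PySem.Dict Int Int :=
    array.foldl (fun d x => d.insert x (d.getD x 0 + 1)) PySem.Dict.empty
  let keys := counts.keys
  let result : PySem.Set Int :=
    keys.foldl (fun s a =>
      keys.foldl (fun s b =>
        if a != b || decide (counts.getD a 0 ≥ 2) then
          let num := a * 10 + b
          if PySem.Int.mod num 2 == 1 then PySem.Set.add s num else s
        else s) s) PySem.Set.empty
  PySem.Set.len result

-- ===== PRECONDITION & SPEC =====
def Spec_solution (array : List Int) (out : Int) : Prop := out = solution_alt array
instance (array : List Int) (out : Int) : Decidable (Spec_solution array out) := by unfold Spec_solution; infer_instance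

-- ===== CLAIM (what is proved, stated in full; the proofs are below) =====
def Claim_equal_solution : Prop := ∀ (array : List Int), Dom_solution array → Spec_solution array (solution array)

-- ===== LEMMAS AND PROOFS =====

-- The set A builds (proof-side abbreviation; definitionally the body of `solution`).
def setA (arr : List Int) : PySem.Set Int :=
  (PySem.List.pyRange 0 (PySem.List.len arr) 1).foldl (fun s i =>
    (PySem.List.pyRange 0 (PySem.List.len arr) 1).foldl (fun s j =>
      if i == j then s
      else
        let num := createNumber (PySem.List.pyGetD arr i 0) (PySem.List.pyGetD arr j 0)
        let isEven := PySem.Int.mod num 2 == 1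
        if isEven then PySem.Set.add s num else s) s) PySem.Set.empty

-- The set B builds, with the counter dictionary already named (rfl-equal to the body of `solution_alt`
-- by PySem.Dict.foldl_insert_getD_add_one_eq_counter).
def setB (arr : List Int) : PySem.Set Int :=
  (PySem.Dict.counter arr).keys.foldl (fun s a =>
    (PySem.Dict.counter arr).keys.foldl (fun s b =>
      if a != b || decide ((PySem.Dict.counter arr).getD a 0 ≥ 2) then
        let num := a * 10 + b
        if PySem.Int.mod num 2 == 1 then PySem.Set.add s num else s
      else s) s) PySem.Set.empty

theorem solution_eq_lenA (arr : List Int) : solution arr = PySem.Set.len (setA arr) := rfl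
theorem solution_alt_eq_lenB (arr : List Int) : solution_alt arr = PySem.Set.len (setB arr) := rfl

-- Membership through a fold whose step satisfies an adds-exactly characterization.
theorem mem_foldl_of_step {β : Type} (Q : β → Int → Prop) (g : PySem.Set Int → β → PySem.Set Int)
    (hg : ∀ s b y, y ∈ g s b ↔ y ∈ s ∨ Q b y) :
    ∀ (l : List β) (s : PySem.Set Int) (y : Int),
      y ∈ l.foldl g s ↔ y ∈ s ∨ ∃ b ∈ l, Q b y := by
  intro l
  induction l with
  | nil => simp
  | cons hd tl ih =>
    intro s y
    rw [List.foldl_cons, ih, hg]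
    simp only [List.mem_cons]
    constructor
    · rintro (⟨h | h⟩ | ⟨b, hb, hq⟩)
      · exact Or.inl h
      · exact Or.inr ⟨hd, Or.inl rfl, h⟩
      · exact Or.inr ⟨b, Or.inr hb, hq⟩
    · rintro (h | ⟨b, (rfl | hb), hq⟩)
      · exact Or.inl (Or.inl h)
      · exact Or.inl (Or.inr hq)
      · exact Or.inr ⟨b, hb, hq⟩

theorem nodup_foldl_of_step {β : Type} (g : PySem.Set Int → β → PySem.Set Int)
    (hg : ∀ s b, s.Nodup → (g s b).Nodup) :
    ∀ (l : List β) (s : PySem.Set Int), s.Nodup → (l.foldl g s).Nodup := by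
  intro l
  induction l with
  | nil => intro s hs; exact hs
  | cons hd tl ih => intro s hs; exact ih _ (hg s hd hs)

-- x is producible: some ordered pair of values at distinct positions, odd result.
def ReachOdd (arr : List Int) (x : Int) : Prop :=
  ∃ a b : Int, a ∈ arr ∧ b ∈ arr ∧ (a ≠ b ∨ 2 ≤ arr.count a) ∧
    PySem.Int.mod (a * 10 + b) 2 = 1 ∧ x = a * 10 + b

theorem two_idx_of_dup (l : List Int) (a : Int) (h : List.Sublist [a, a] l) :
    ∃ i j : Nat, i < l.length ∧ j < l.length ∧ i ≠ j ∧ l[i]? = some a ∧ l[j]? = some a := by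
  rw [List.cons_sublist_iff] at h
  obtain ⟨r1, r2, rfl, h1, h2⟩ := h
  rw [List.singleton_sublist] at h2
  obtain ⟨i, hi, hia⟩ := List.getElem_of_mem h1
  obtain ⟨j, hj, hja⟩ := List.getElem_of_mem h2
  refine ⟨i, r1.length + j, ?_, ?_, by omega, ?_, ?_⟩
  · simp; omega
  · simp; omega
  · rw [List.getElem?_append_left hi, List.getElem?_eq_getElem hi, hia]
  · rw [List.getElem?_append_right (by omega)]
    have h2 : r1.length + j - r1.length = j := by omega
    rw [h2, List.getElem?_eq_getElem hj, hja]

theorem count_two_of_idx (l : List Int) (a : Int) (i j : Nat) (hij : i < j) (hjl : j < l.length)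
    (hi : l[i]? = some a) (hj : l[j]? = some a) : 2 ≤ l.count a := by
  rw [← List.duplicate_iff_two_le_count, List.duplicate_iff_sublist, List.cons_sublist_iff]
  refine ⟨l.take (i + 1), l.drop (i + 1), (List.take_append_drop _ _).symm, ?_, ?_⟩
  · rw [List.getElem?_eq_getElem (by omega)] at hi
    have hil : i < (l.take (i + 1)).length := by simp; omega
    have h : (l.take (i + 1))[i] = a := by rw [List.getElem_take]; exact Option.some.inj hi
    exact h ▸ List.getElem_mem _
  · rw [List.singleton_sublist]
    rw [List.getElem?_eq_getElem hjl] at hj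
    have hlt : j - (i + 1) < (l.drop (i + 1)).length := by simp; omega
    have h : (l.drop (i + 1))[j - (i + 1)] = a := by
      rw [List.getElem_drop]
      have h2 : i + 1 + (j - (i + 1)) = j := by omega
      simp_rw [h2]
      exact Option.some.inj hj
    exact h ▸ List.getElem_mem _

-- Two distinct positions carrying values a and b exist iff a, b both occur and (a ≠ b or a occurs twice).
theorem pair_idx_iff (arr : List Int) (a b : Int) :
    (∃ i j : Nat, i < arr.length ∧ j < arr.length ∧ i ≠ j ∧ arr[i]? = some a ∧ arr[j]? = some b)
      ↔ (a ∈ arr ∧ b ∈ arr ∧ (a ≠ b ∨ 2 ≤ arr.count a)) := by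
  constructor
  · rintro ⟨i, j, hi, hj, hij, ha, hb⟩
    refine ⟨List.mem_of_getElem? ha, List.mem_of_getElem? hb, ?_⟩
    by_cases hab : a = b
    · subst hab
      right
      rcases Nat.lt_or_ge i j with h | h
      · exact count_two_of_idx arr a i j h hj ha hb
      · exact count_two_of_idx arr a j i (by omega) hi hb ha
    · exact Or.inl hab
  · rintro ⟨ha, hb, hcase⟩
    by_cases hab : a = b
    · subst hab
      have hcnt : 2 ≤ arr.count a := by
        rcases hcase with h | h
        · exact absurd rfl h
        · exact h
      have hdup : List.Sublist [a, a] arr := by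
        rw [← List.duplicate_iff_sublist, List.duplicate_iff_two_le_count]; exact hcnt
      obtain ⟨i, j, hi, hj, hij, hia, hja⟩ := two_idx_of_dup arr a hdup
      exact ⟨i, j, hi, hj, hij, hia, hja⟩
    · obtain ⟨i, hi, hia⟩ := List.getElem_of_mem ha
      obtain ⟨j, hj, hjb⟩ := List.getElem_of_mem hb
      refine ⟨i, j, hi, hj, ?_, ?_, ?_⟩
      · intro h; subst h; exact hab (hia ▸ hjb ▸ rfl)
      · rw [List.getElem?_eq_getElem hi, hia]
      · rw [List.getElem?_eq_getElem hj, hjb]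

theorem A_mem (arr : List Int) (x : Int) : x ∈ setA arr ↔ ReachOdd arr x := by
  unfold setA
  rw [mem_foldl_of_step
      (fun i y => ∃ j ∈ PySem.List.pyRange 0 (PySem.List.len arr) 1, i ≠ j ∧
        PySem.Int.mod (createNumber (PySem.List.pyGetD arr i 0) (PySem.List.pyGetD arr j 0)) 2 = 1 ∧
        y = createNumber (PySem.List.pyGetD arr i 0) (PySem.List.pyGetD arr j 0))]
  · constructor
    · rintro (h | ⟨i, hi, j, hj, hij, hodd, rfl⟩)
      · simp [PySem.Set.empty] at h
      · rw [PySem.List.mem_pyRange_one] at hi hj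
        simp only [PySem.List.len_eq] at hi hj
        have hgi : PySem.List.pyGetD arr i 0 = arr[i.toNat]'(by omega) :=
          PySem.List.pyGetD_eq_getElem arr 0 hi.1 hi.2
        have hgj : PySem.List.pyGetD arr j 0 = arr[j.toNat]'(by omega) :=
          PySem.List.pyGetD_eq_getElem arr 0 hj.1 hj.2
        have hpair := (pair_idx_iff arr (arr[i.toNat]'(by omega)) (arr[j.toNat]'(by omega))).mp
          ⟨i.toNat, j.toNat, by omega, by omega, by omega,
            List.getElem?_eq_getElem _, List.getElem?_eq_getElem _⟩
        exact ⟨_, _, hpair.1, hpair.2.1, hpair.2.2, by rw [createNumber, hgi, hgj] at hodd; exact hodd,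
          by rw [createNumber, hgi, hgj]⟩
    · rintro ⟨a, b, ha, hb, hcase, hodd, rfl⟩
      obtain ⟨i, j, hi, hj, hij, hia, hjb⟩ := (pair_idx_iff arr a b).mpr ⟨ha, hb, hcase⟩
      right
      refine ⟨(i : Int), ?_, (j : Int), ?_, ?_, ?_, ?_⟩
      · rw [PySem.List.mem_pyRange_one]; simp [PySem.List.len_eq]; omega
      · rw [PySem.List.mem_pyRange_one]; simp [PySem.List.len_eq]; omega
      · exact_mod_cast fun h => hij (by exact_mod_cast h)
      all_goals
        have hga : PySem.List.pyGetD arr (i : Int) 0 = a := by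
          rw [PySem.List.pyGetD_natCast, List.getD_eq_getElem?_getD, hia]; rfl
        have hgb : PySem.List.pyGetD arr (j : Int) 0 = b := by
          rw [PySem.List.pyGetD_natCast, List.getD_eq_getElem?_getD, hjb]; rfl
        rw [createNumber, hga, hgb]
      exact hodd
  · intro s i y
    rw [mem_foldl_of_step
        (fun j y => i ≠ j ∧
          PySem.Int.mod (createNumber (PySem.List.pyGetD arr i 0) (PySem.List.pyGetD arr j 0)) 2 = 1 ∧
          y = createNumber (PySem.List.pyGetD arr i 0) (PySem.List.pyGetD arr j 0))]
    intro s j y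
    by_cases hij : i = j
    · simp [hij]
    · simp only [beq_iff_eq, hij, if_false]
      split_ifs with hodd
      · rw [PySem.Set.mem_add]
        constructor
        · rintro (h | rfl)
          · exact Or.inl h
          · exact Or.inr ⟨hij, hodd, rfl⟩
        · rintro (h | ⟨-, -, rfl⟩)
          · exact Or.inl h
          · exact Or.inr rfl
      · constructor
        · exact Or.inl
        · rintro (h | ⟨-, h2, -⟩)
          · exact h
          · exact absurd h2 hodd

theorem B_mem (arr : List Int) (x : Int) : x ∈ setB arr ↔ ReachOdd arr x := by
  unfold setB
  rw [mem_foldl_of_step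
      (fun a y => ∃ b ∈ (PySem.Dict.counter arr).keys, (a ≠ b ∨ 2 ≤ arr.count a) ∧
        PySem.Int.mod (a * 10 + b) 2 = 1 ∧ y = a * 10 + b)]
  · simp only [PySem.Dict.keys_counter, PySem.Set.mem_ofList]
    constructor
    · rintro (h | ⟨a, ha, b, hb, hcase, hodd, rfl⟩)
      · simp [PySem.Set.empty] at h
      · exact ⟨a, b, ha, hb, hcase, hodd, rfl⟩
    · rintro ⟨a, b, ha, hb, hcase, hodd, rfl⟩
      exact Or.inr ⟨a, ha, b, hb, hcase, hodd, rfl⟩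
  · intro s a y
    rw [mem_foldl_of_step
        (fun b y => (a ≠ b ∨ 2 ≤ arr.count a) ∧
          PySem.Int.mod (a * 10 + b) 2 = 1 ∧ y = a * 10 + b)]
    intro s b y
    by_cases hcond : a ≠ b ∨ 2 ≤ arr.count a
    · have hb : (a != b || decide ((PySem.Dict.counter arr).getD a 0 ≥ 2)) = true := by
        rw [PySem.Dict.getD_counter]
        simp only [Bool.or_eq_true, bne_iff_ne, decide_eq_true_eq, ge_iff_le]
        rcases hcond with h | h
        · exact Or.inl h
        · exact Or.inr (by exact_mod_cast h)
      rw [hb]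
      simp only [if_true]
      split_ifs with hodd
      · rw [beq_iff_eq] at hodd
        rw [PySem.Set.mem_add]
        constructor
        · rintro (h | rfl)
          · exact Or.inl h
          · exact Or.inr ⟨hcond, hodd, rfl⟩
        · rintro (h | ⟨-, -, rfl⟩)
          · exact Or.inl h
          · exact Or.inr rfl
      · rw [beq_iff_eq] at hodd
        constructor
        · exact Or.inl
        · rintro (h | ⟨-, h2, -⟩)
          · exact h
          · exact absurd h2 hodd
    · obtain ⟨h1, h2⟩ := not_or.mp hcond
      have hb : (a != b || decide ((PySem.Dict.counter arr).getD a 0 ≥ 2)) = false := by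
        rw [PySem.Dict.getD_counter]
        simp only [Bool.or_eq_false_iff, bne_eq_false_iff_eq, decide_eq_false_iff_not, ge_iff_le]
        refine ⟨not_not.mp h1, ?_⟩
        intro hc
        exact h2 (by exact_mod_cast hc)
      rw [hb]
      simp only [Bool.false_eq_true, if_false]
      constructor
      · exact Or.inl
      · rintro (h | ⟨hc, -, -⟩)
        · exact h
        · exact absurd hc hcond

theorem nodup_setA (arr : List Int) : (setA arr).Nodup := by
  unfold setA
  apply nodup_foldl_of_step
  · intro s i hs
    apply nodup_foldl_of_step
    · intro s j hs
      dsimp only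
      split_ifs
      all_goals first | exact hs | exact PySem.Set.nodup_add _ _ hs
    · exact hs
  · exact List.nodup_nil

theorem nodup_setB (arr : List Int) : (setB arr).Nodup := by
  unfold setB
  apply nodup_foldl_of_step
  · intro s a hs
    apply nodup_foldl_of_step
    · intro s b hs
      dsimp only
      split_ifs
      all_goals first | exact hs | exact PySem.Set.nodup_add _ _ hs
    · exact hs
  · exact List.nodup_nil

-- ===== VERDICT (by name: the statement is the Claim_ definition above) =====
theorem solution_spec : Claim_equal_solution := by
  intro array _
  unfold Spec_solution
  rw [solution_eq_lenA, solution_alt_eq_lenB, PySem.Set.len, PySem.Set.len]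
  have hperm : (setA array).Perm (setB array) :=
    (List.perm_ext_iff_of_nodup (nodup_setA array) (nodup_setB array)).mpr
      (fun x => (A_mem array x).trans (B_mem array x).symm)
  exact_mod_cast hperm.length_eq
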